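-- pv_equiv track=rewrite | github.com/ulnasensei/mooc-programming-23 | part05-24_oldest_person/src/oldest_person.py | oldest_person
-- ===== SOURCE A (Python) =====
-- def oldest_person(people: list) -> str:
--     oldest = people[0][0]
--     oldest_age = people[0][1]
--
--     for person in people:
--         if person[1] < oldest_age:
--             oldest_age = person[1]
--             oldest = person[0]
--
--     return oldest
-- ===== SOURCE B (Python) =====
-- def oldest_person(people: list) -> str:
--     return sorted(people, key=lambda p: p[1])[0][0]
-- ===== Notes on version B (the rewrite author's own statement) =====
-- stated objective: simpler
-- what changed: Replaces A's explicit linear min-scan with a one-line stable sort by age and taking the first element's name; sort stability preserves A's first-occurrence-on-tie behaviour.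
import Mathlib
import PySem

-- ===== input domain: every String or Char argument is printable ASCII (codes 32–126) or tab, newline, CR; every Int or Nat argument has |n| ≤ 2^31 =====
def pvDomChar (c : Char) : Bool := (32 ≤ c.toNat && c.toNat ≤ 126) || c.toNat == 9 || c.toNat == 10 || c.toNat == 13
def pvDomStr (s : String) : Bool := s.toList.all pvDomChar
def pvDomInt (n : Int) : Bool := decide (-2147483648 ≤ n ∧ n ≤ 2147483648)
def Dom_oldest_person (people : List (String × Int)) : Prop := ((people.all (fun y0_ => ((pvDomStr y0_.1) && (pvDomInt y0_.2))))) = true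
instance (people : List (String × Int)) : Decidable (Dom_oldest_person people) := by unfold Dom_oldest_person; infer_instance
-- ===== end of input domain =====

-- B replaces A's explicit linear min-scan with a stable sort by age, returning the
-- first element's name (equal simplicity, O(n log n) vs O(n)); stability preserves
-- A's first-occurrence-on-tie. Both raise IndexError on [], excluded by Pre_.

-- ===== PORT A =====
-- people[0] raises IndexError on []; that input is outside Pre_oldest_person
def oldest_person (people : List (String × Int)) : String :=
  match PySem.List.pyGet? people 0 with
  | none => ""  -- IndexError on []: unreachable under Pre_oldest_person
  | some p0 =>
    let st := people.foldl
      (fun (s : String × Int) person =>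
        if person.2 < s.2 then (person.1, person.2) else s)
      (p0.1, p0.2)
    st.1

-- ===== PORT B =====
def oldest_person_alt (people : List (String × Int)) : String :=
  match PySem.List.sorted people (fun p => p.2) false with
  | [] => ""  -- sorted([])[0] raises IndexError: unreachable under Pre_oldest_person
  | p :: _ => p.1

-- ===== PRECONDITION & SPEC =====
-- A (and B) raise IndexError on the empty list; no other input is excluded.
def Pre_oldest_person (people : List (String × Int)) : Prop := people ≠ []
instance (people : List (String × Int)) : Decidable (Pre_oldest_person people) := by
  unfold Pre_oldest_person; infer_instance
def pvWitness_oldest_person : (List (String × Int)) := [("alice", 30), ("bob", 25)]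

def Spec_oldest_person (people : List (String × Int)) (out : String) : Prop := out = oldest_person_alt people
instance (people : List (String × Int)) (out : String) : Decidable (Spec_oldest_person people out) := by unfold Spec_oldest_person; infer_instance

-- ===== CLAIM (what is proved, stated in full; the proofs are below) =====
def Claim_equal_oldest_person : Prop := ∀ (people : List (String × Int)), Dom_oldest_person people → Pre_oldest_person people → Spec_oldest_person people (oldest_person people)

-- ===== LEMMAS AND PROOFS =====

-- Head of the stable insertion accumulator evolves exactly like A's running minimum.
theorem head?_foldl_insertBy (xs : List (String × Int)) (h : String × Int)
    (t : List (String × Int)) :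
    (xs.foldl (fun acc x => PySem.List.insertBy (fun a b => decide (a.2 < b.2)) x acc) (h :: t)).head?
      = some (xs.foldl (fun s x => if x.2 < s.2 then x else s) h) := by
  induction xs generalizing h t with
  | nil => rfl
  | cons x xs ih =>
    simp only [List.foldl_cons, PySem.List.insertBy]
    by_cases hx : x.2 < h.2
    · simp [hx, ih]
    · simp [hx, ih]

-- ===== VERDICT (by name: the statement is the Claim_ definition above) =====
theorem oldest_person_spec : Claim_equal_oldest_person := by
  intro people _ hpre
  match people with
  | [] => exact absurd rfl hpre
  | p :: rest =>
    show oldest_person (p :: rest) = oldest_person_alt (p :: rest)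
    have hsorted : PySem.List.sorted (p :: rest) (fun q => q.2) false
        = List.foldl (fun acc x => PySem.List.insertBy (fun a b => decide (a.2 < b.2)) x acc) [] (p :: rest) :=
      PySem.List.sorted_eq_foldl_insertBy _ _
    have hhead :
        (PySem.List.sorted (p :: rest) (fun q => q.2) false).head?
          = some (rest.foldl (fun s x => if x.2 < s.2 then x else s) p) := by
      rw [hsorted]
      simpa [PySem.List.insertBy] using head?_foldl_insertBy rest p []
    rcases hs : PySem.List.sorted (p :: rest) (fun q => q.2) false with _ | ⟨m, tl⟩
    · rw [hs] at hhead; simp at hhead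
    · rw [hs] at hhead
      have hm : m = rest.foldl (fun s x => if x.2 < s.2 then x else s) p := by
        simpa using hhead
      show oldest_person (p :: rest) = _
      simp only [oldest_person, oldest_person_alt, hs]
      simp [PySem.List.pyGet?, PySem.List.pyIdx?, hm]
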